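-- pv_equiv track=rewrite | github.com/MakeContributions/DSA | algorithms/Python/arrays/equalize_the_array.py | equalizeArray
-- ===== SOURCE A (Python) =====
-- def equalizeArray(arr):
--
--     hash_table={}
--     for i in arr:
--         if i in hash_table:
--             hash_table[i]+=1
--         else:
--             hash_table[i]=1
--     max_hash_table=0
--     max_key=0
--     for i in hash_table:
--         if hash_table[i]>max_hash_table:
--             max_hash_table=hash_table[i]
--             max_key=i
--     deletion=0
--     for i in hash_table:
--         if hash_table[i]<=max_hash_table and i!=max_key:
--             deletion+=hash_table[i]
--     return deletion
-- ===== SOURCE B (Python) =====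
-- def equalizeArray(arr):
--     # sort, then scan: the longest run of equal neighbours in the sorted list
--     # is the maximum frequency; deletions = len(arr) - that run. No hash table.
--     s = sorted(arr)
--     best = 0
--     run = 0
--     prev = None
--     for v in s:
--         if v == prev:
--             run += 1
--         else:
--             run = 1
--             prev = v
--         if run > best:
--             best = run
--     return len(arr) - best
-- ===== Notes on version B (the rewrite author's own statement) =====
-- stated objective: alternative
-- what changed: B uses no hash table: it sorts the array and finds the maximum frequency as the longest run of equal neighbours in one linear scan, returning len(arr) minus it, instead of A's dict build plus two key-scanning loops.
import Mathlib
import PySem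

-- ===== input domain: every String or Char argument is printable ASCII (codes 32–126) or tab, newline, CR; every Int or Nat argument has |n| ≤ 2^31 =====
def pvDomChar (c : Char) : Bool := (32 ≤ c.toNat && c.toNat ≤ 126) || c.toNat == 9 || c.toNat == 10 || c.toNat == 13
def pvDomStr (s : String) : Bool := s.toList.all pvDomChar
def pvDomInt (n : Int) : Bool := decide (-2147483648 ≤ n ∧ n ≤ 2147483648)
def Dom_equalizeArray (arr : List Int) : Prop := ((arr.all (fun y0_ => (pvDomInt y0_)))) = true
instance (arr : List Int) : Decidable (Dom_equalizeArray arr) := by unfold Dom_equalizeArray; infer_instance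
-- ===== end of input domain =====

-- B uses no hash table: it sorts the array and finds the maximum frequency as the longest
-- run of equal neighbours in one linear scan, instead of A's dict build plus two
-- key-scanning loops (objective: alternative).


-- ===== PORT A =====
-- literal port of A: build hash_table (keeping the if-present branch), then the running-max loop
-- over the keys tracking (max_hash_table, max_key), then the loop summing the non-max-key buckets.
-- Python's 'hash_table[i]' inside the key loops is ported as 'getD i 0'; this is exact because
-- i ranges over the dict's own keys, so a KeyError is impossible.
def equalizeArray (arr : List Int) : Int :=
  let hash_table : PySem.Dict Int Int :=
    arr.foldl (fun d i =>
      if d.contains i then d.insert i (d.getD i 0 + 1) else d.insert i 1) PySem.Dict.empty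
  let s : Int × Int :=
    hash_table.keys.foldl (fun s i =>
      if hash_table.getD i 0 > s.1 then (hash_table.getD i 0, i) else s) (0, 0)
  hash_table.keys.foldl (fun deletion i =>
    if hash_table.getD i 0 ≤ s.1 ∧ i ≠ s.2 then deletion + hash_table.getD i 0 else deletion) 0

-- ===== PORT B =====
-- loop body of Source B's for-loop: update (best, run, prev) for one element v
def pvScanStep (st : Int × Int × Option Int) (v : Int) : Int × Int × Option Int :=
  let best := st.1
  let run := st.2.1
  let prev := st.2.2
  let rp : Int × Option Int := if some v = prev then (run + 1, prev) else (1, some v)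
  (if rp.1 > best then rp.1 else best, rp.1, rp.2)

-- literal port of Source B: sort, scan for the longest run of equal neighbours, len(arr) - best
def equalizeArray_alt (arr : List Int) : Int :=
  let s := PySem.List.sorted arr (fun x => x) false
  let st := s.foldl pvScanStep ((0 : Int), (0 : Int), (none : Option Int))
  (arr.length : Int) - st.1

-- ===== PRECONDITION & SPEC =====
def Spec_equalizeArray (arr : List Int) (out : Int) : Prop := out = equalizeArray_alt arr
instance (arr : List Int) (out : Int) : Decidable (Spec_equalizeArray arr out) := by unfold Spec_equalizeArray; infer_instance

-- ===== CLAIM (what is proved, stated in full; the proofs are below) =====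
def Claim_equal_equalizeArray : Prop := ∀ (arr : List Int), Dom_equalizeArray arr → Spec_equalizeArray arr (equalizeArray arr)

-- ===== LEMMAS AND PROOFS =====

-- A's counting step equals the plain insert-based counting step
lemma eq_count_step :
    (fun (d : PySem.Dict Int Int) (i : Int) =>
      if d.contains i then d.insert i (d.getD i 0 + 1) else d.insert i 1)
    = (fun (d : PySem.Dict Int Int) (x : Int) => d.insert x (d.getD x 0 + 1)) := by
  funext d i
  by_cases h : d.contains i
  · simp [h]
  · have h' : d.contains i = false := by simpa using h
    have : d.getD i 0 = 0 := PySem.Dict.getD_of_not_contains d 0 h'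
    simp [h', this]

-- invariant of A's running-max loop
lemma maxloop_inv (c : Int → Int) (K : List Int) (s0 : Int × Int) :
    (K.foldl (fun s i => if c i > s.1 then (c i, i) else s) s0 = s0 ∨
      ((K.foldl (fun s i => if c i > s.1 then (c i, i) else s) s0).2 ∈ K ∧
       c (K.foldl (fun s i => if c i > s.1 then (c i, i) else s) s0).2
         = (K.foldl (fun s i => if c i > s.1 then (c i, i) else s) s0).1)) ∧
    s0.1 ≤ (K.foldl (fun s i => if c i > s.1 then (c i, i) else s) s0).1 ∧
    ∀ k ∈ K, c k ≤ (K.foldl (fun s i => if c i > s.1 then (c i, i) else s) s0).1 := by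
  induction K generalizing s0 with
  | nil => simp
  | cons i K ih =>
    by_cases h : c i > s0.1
    · have := ih (c i, i)
      simp only [List.foldl_cons, if_pos h]
      refine ⟨?_, by omega, ?_⟩
      · rcases this.1 with h1 | h1
        · right; rw [h1]; simp
        · right; exact ⟨List.mem_cons_of_mem _ h1.1, h1.2⟩
      · intro k hk
        rcases List.mem_cons.mp hk with rfl | hk
        · have := this.2.1; omega
        · exact this.2.2 k hk
    · have := ih s0
      simp only [List.foldl_cons, if_neg h]
      refine ⟨?_, this.2.1, ?_⟩
      · rcases this.1 with h1 | h1
        · left; exact h1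
        · right; exact ⟨List.mem_cons_of_mem _ h1.1, h1.2⟩
      · intro k hk
        rcases List.mem_cons.mp hk with rfl | hk
        · have := this.2.1; omega
        · exact this.2.2 k hk

-- summing all buckets except one key's, over a duplicate-free key list
lemma sum_if_ne (c : Int → Int) (K : List Int) (m : Int) (hnd : K.Nodup) (hm : m ∈ K) :
    (K.map fun i => if i ≠ m then c i else 0).sum = (K.map c).sum - c m := by
  induction K with
  | nil => simp at hm
  | cons a K ih =>
    have hnotin := (List.nodup_cons.mp hnd).1
    rcases List.mem_cons.mp hm with rfl | hm
    · have heq : (K.map fun i => if i ≠ m then c i else 0) = K.map c := by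
        apply List.map_congr_left
        intro x hx
        have : x ≠ m := fun h => hnotin (h ▸ hx)
        simp [this]
      simp only [List.map_cons, ite_not, if_true]
      rw [show ((fun i => if i = m then 0 else c i)) = (fun i => if i ≠ m then c i else 0) by
        funext i; by_cases h : i = m <;> simp [h]]
      rw [heq]; simp
    · have ha : a ≠ m := fun h => hnotin (h ▸ hm)
      have := ih (List.nodup_cons.mp hnd).2 hm
      simp only [List.map_cons, List.sum_cons, if_pos ha, this]
      omega

-- the counts over the distinct elements sum to the length
lemma sum_count_eq_length (arr : List Int) :
    ((PySem.Set.ofList arr).map fun k => (arr.count k : Int)).sum = (arr.length : Int) := by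
  have hperm : (PySem.Set.ofList arr).Perm arr.dedup := by
    rw [List.perm_ext_iff_of_nodup (PySem.Set.nodup_ofList arr) arr.nodup_dedup]
    intro a
    rw [PySem.Set.mem_ofList, List.mem_dedup]
  rw [(hperm.map fun k => (arr.count k : Int)).sum_eq,
      ← List.sum_map_count_dedup_eq_length arr, Nat.cast_list_sum, List.map_map]
  rfl

-- invariant of B's run scan over a sorted (Pairwise ≤) nonempty list: the state is
-- (best, trailing-run length, last value); the trailing run is the full count of the last
-- value, and best is the maximum count, attained at some element
lemma scan_inv (l : List Int) (hs : l.Pairwise (· ≤ ·)) (hne : l ≠ []) :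
    ∃ B p, l.foldl pvScanStep ((0 : Int), (0 : Int), (none : Option Int))
        = (B, (l.count p : Int), some p) ∧ p ∈ l ∧ (∀ e ∈ l, e ≤ p) ∧
      (∃ k ∈ l, B = (l.count k : Int)) ∧ (∀ k ∈ l, (l.count k : Int) ≤ B) := by
  induction l using List.reverseRecOn with
  | nil => exact absurd rfl hne
  | append_singleton l' a ih =>
    rcases List.pairwise_append.mp hs with ⟨hs', -, hcross⟩
    have hcross' : ∀ e ∈ l', e ≤ a := fun e he => hcross e he a (List.mem_singleton_self a)
    rcases eq_or_ne l' [] with rfl | hne'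
    · refine ⟨1, a, ?_, by simp, by simp, ⟨a, by simp⟩, by simp⟩
      simp [pvScanStep]
    · obtain ⟨B, p, hfold, hpmem, hple, ⟨k, hk, hkeq⟩, hbound⟩ := ih hs' hne'
      have hcnt : ∀ q : Int, (l' ++ [a]).count q = l'.count q + if a = q then 1 else 0 := by
        intro q
        rw [List.count_append]
        by_cases h : a = q
        · subst h; simp
        · simp [h]
      have hBpos : (1 : Int) ≤ B := by
        have h1 : 1 ≤ l'.count p := List.one_le_count_iff.mpr hpmem
        have := hbound p hpmem
        omega
      rw [List.foldl_append, hfold, List.foldl_cons, List.foldl_nil]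
      by_cases hap : a = p
      · subst hap
        have hstep : pvScanStep (B, (l'.count a : Int), some a) a
            = (if (l'.count a : Int) + 1 > B then (l'.count a : Int) + 1 else B,
               (l'.count a : Int) + 1, some a) := by
          simp [pvScanStep]
        rw [hstep]
        have hcnta : ((l' ++ [a]).count a : Int) = (l'.count a : Int) + 1 := by
          rw [hcnt a]; simp
        refine ⟨if (l'.count a : Int) + 1 > B then (l'.count a : Int) + 1 else B, a, ?_,
          List.mem_append_right _ (by simp), ?_, ?_, ?_⟩
        · rw [hcnta]
        · intro e he
          rcases List.mem_append.mp he with he | he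
          · exact hcross' e he
          · simp at he; omega
        · split_ifs with h
          · exact ⟨a, List.mem_append_right _ (by simp), by rw [hcnta]⟩
          · have hka : k ≠ a := by
              intro h'; subst h'
              have := hbound k hk
              omega
            refine ⟨k, List.mem_append_left _ hk, ?_⟩
            rw [hcnt k, if_neg (fun h' => hka h'.symm)]
            push_cast
            omega
        · intro q hq
          by_cases hqa : a = q
          · subst hqa
            rw [hcnta]
            have := hbound a hpmem
            split_ifs with h <;> omega
          · rw [hcnt q, if_neg hqa]
            have hqmem : q ∈ l' := by
              rcases List.mem_append.mp hq with h | h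
              · exact h
              · simp at h; exact absurd h.symm hqa
            have := hbound q hqmem
            split_ifs with h <;> push_cast <;> omega
      · have hanotin : a ∉ l' := by
          intro hin
          have h2 := hcross' p hpmem
          have h3 := hple a hin
          exact hap (le_antisymm h3 h2)
        have hstep : pvScanStep (B, (l'.count p : Int), some p) a
            = (if (1 : Int) > B then 1 else B, 1, some a) := by
          have hne2 : ¬ (some a = some p) := by simpa using hap
          simp [pvScanStep, hne2]
        rw [hstep]
        have hBmax : (if (1 : Int) > B then 1 else B) = B := by
          split_ifs with h
          · omega
          · rfl
        rw [hBmax]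
        have hca : ((l' ++ [a]).count a : Int) = 1 := by
          rw [hcnt a, List.count_eq_zero_of_not_mem hanotin]; simp
        refine ⟨B, a, by rw [hca], List.mem_append_right _ (by simp), ?_, ?_, ?_⟩
        · intro e he
          rcases List.mem_append.mp he with he | he
          · exact hcross' e he
          · simp at he; omega
        · have hka : k ≠ a := fun h => hanotin (h ▸ hk)
          refine ⟨k, List.mem_append_left _ hk, ?_⟩
          rw [hcnt k, if_neg (fun h' => hka h'.symm)]
          push_cast
          omega
        · intro q hq
          rcases List.mem_append.mp hq with h | h
          · have hqa : a ≠ q := fun h' => hanotin (h' ▸ h)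
            rw [hcnt q, if_neg hqa]
            have := hbound q h
            push_cast
            omega
          · simp at h; subst h
            rw [hca]
            exact hBpos

-- ===== VERDICT (by name: the statement is the Claim_ definition above) =====
theorem equalizeArray_spec : Claim_equal_equalizeArray := by
  intro arr _
  show equalizeArray arr = equalizeArray_alt arr
  rcases eq_or_ne arr [] with rfl | hne
  · rfl
  unfold equalizeArray equalizeArray_alt
  rw [eq_count_step, PySem.Dict.foldl_insert_getD_add_one_eq_counter]
  simp only [PySem.Dict.getD_counter, PySem.Dict.keys_counter]
  set K := PySem.Set.ofList arr with hK
  set c : Int → Int := fun k => (arr.count k : Int) with hc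
  have hKnd : K.Nodup := PySem.Set.nodup_ofList arr
  have hmemK : ∀ k, k ∈ K ↔ k ∈ arr := PySem.Set.mem_ofList arr
  have hKne : K ≠ [] := by
    rcases List.exists_mem_of_ne_nil arr hne with ⟨a, ha⟩
    intro h; rw [← hmemK] at ha; simp [h] at ha
  -- the running-max loop
  set s := K.foldl (fun s i => if c i > s.1 then (c i, i) else s) ((0 : Int), (0 : Int)) with hs
  obtain ⟨hcase, -, hbound⟩ := maxloop_inv c K ((0 : Int), (0 : Int))
  rw [← hs] at hcase hbound
  have hpos : ∀ k ∈ K, 0 < c k := by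
    intro k hk
    have : 1 ≤ arr.count k := List.one_le_count_iff.mpr ((hmemK k).mp hk)
    simp only [hc]; exact_mod_cast this
  have hprop : s.2 ∈ K ∧ c s.2 = s.1 := by
    rcases hcase with h | h
    · exfalso
      rcases List.exists_mem_of_ne_nil K hKne with ⟨a, ha⟩
      have h1 := hbound a ha
      have h2 := hpos a ha
      rw [h] at h1; simp at h1; omega
    · exact h
  -- the deletion loop sums every bucket except the max key's
  have hdel : K.foldl (fun deletion i => if c i ≤ s.1 ∧ i ≠ s.2 then deletion + c i else deletion) 0
      = (K.map c).sum - c s.2 := by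
    rw [PySem.List.foldl_congr_mem K _
        (fun deletion i => deletion + if i ≠ s.2 then c i else 0) 0 ?_]
    · rw [PySem.List.foldl_add, sum_if_ne c K s.2 hKnd hprop.1]
      ring
    · intro acc x hx
      have hxle : c x ≤ s.1 := hbound x hx
      by_cases h : x = s.2 <;> simp [h, hxle]
  rw [hdel, sum_count_eq_length]
  -- B: the longest run in the sorted copy is the same maximum
  set L := PySem.List.sorted arr (fun x => x) false with hL
  have hperm : L.Perm arr := PySem.List.sorted_perm arr (fun x => x) false
  have hLs : L.Pairwise (· ≤ ·) := by
    have := PySem.List.sorted_pairwise arr (fun x => x)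
    simpa using this
  have hLne : L ≠ [] := by
    intro h
    rw [h] at hperm
    exact hne hperm.symm.eq_nil
  obtain ⟨B, p, hfold, hpmem, -, ⟨k, hk, hkeq⟩, hBbound⟩ := scan_inv L hLs hLne
  have hcntL : ∀ q : Int, L.count q = arr.count q := fun q => hperm.count_eq q
  have hmemL : ∀ q : Int, q ∈ L ↔ q ∈ arr := fun q => hperm.mem_iff
  have hBle : B ≤ s.1 := by
    rw [hkeq]
    have hck : (L.count k : Int) = c k := by rw [hc]; rw [hcntL k]
    rw [hck]
    exact hbound k ((hmemK k).mpr ((hmemL k).mp hk))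
  have hsle : s.1 ≤ B := by
    rw [← hprop.2]
    have h1 := hBbound s.2 ((hmemL s.2).mpr ((hmemK s.2).mp hprop.1))
    rw [hcntL] at h1
    exact h1
  rw [hprop.2, hfold]
  simp only
  omega
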